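-- pv_equiv track=rewrite | github.com/Faildes/ComfyUI-TC_ADV_ZPrompt | tc_adv_zprompt_encode.py | _split_top_level_AND
-- ===== SOURCE A (Python) =====
-- from typing import List, Tuple, Optional, Union
--
-- def _split_top_level_AND(text: str) -> List[str]:
--     out, buf = [], []
--     pr = br = 0
--     s = text or ""
--     n = len(s)
--     i = 0
--
--     def boundary(ch: str) -> bool:
--         return ch.isspace() or (not ch.isalnum() and ch != "_")
--
--     while i < n:
--         ch = s[i]
--         if ch == "\\" and i + 1 < n:
--             buf.append(s[i]); buf.append(s[i+1])
--             i += 2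
--             continue
--
--         if ch == "(":
--             pr += 1
--         elif ch == ")" and pr > 0:
--             pr -= 1
--         elif ch == "[":
--             br += 1
--         elif ch == "]" and br > 0:
--             br -= 1
--
--         if pr == 0 and br == 0 and i + 3 <= n and s[i:i+3] == "AND":
--             prev = s[i-1] if i > 0 else " "
--             nxt  = s[i+3] if i + 3 < n else " "
--             if boundary(prev) and boundary(nxt):
--                 seg = "".join(buf).strip()
--                 if seg:
--                     out.append(seg)
--                 buf = []
--                 i += 3
--                 continue
--
--         buf.append(ch)
--         i += 1
--
--     seg = "".join(buf).strip()
--     if seg or not out: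
--         out.append(seg)
--     return out
-- ===== SOURCE B (Python) =====
-- from typing import List
--
-- def _boundary(ch: str) -> bool:
--     return ch.isspace() or (not ch.isalnum() and ch != "_")
--
-- def _tokenize(s: str) -> List[str]:
--     # cut the string into escape pairs "\X" and single chars
--     toks = []
--     i = 0
--     n = len(s)
--     while i < n:
--         if s[i] == "\\" and i + 1 < n:
--             toks.append(s[i:i+2])
--             i += 2
--         else:
--             toks.append(s[i])
--             i += 1
--     return toks
--
-- def _split_top_level_AND(text: str) -> List[str]:
--     toks = _tokenize(text or "")
--     # group the tokens into raw segments separated by top-level AND tokens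
--     segs, cur = [], []
--     prev = " "
--     pr = br = 0
--     k = 0
--     while k < len(toks):
--         t = toks[k]
--         if len(t) == 2:
--             cur.append(t)
--             prev = t[1]
--             k += 1
--             continue
--         if t == "(":
--             pr += 1
--         elif t == ")" and pr > 0:
--             pr -= 1
--         elif t == "[":
--             br += 1
--         elif t == "]" and br > 0:
--             br -= 1
--         if (pr == 0 and br == 0 and toks[k:k+3] == ["A", "N", "D"]
--                 and _boundary(prev)
--                 and _boundary(toks[k+3][0] if k + 3 < len(toks) else " ")):
--             segs.append(cur)
--             cur = []
--             prev = "D"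
--             k += 3
--             continue
--         cur.append(t)
--         prev = t
--         k += 1
--     segs.append(cur)
--     # format: strip every segment, drop empty middles, keep the last if non-empty
--     # or nothing was emitted
--     out = []
--     for g in segs[:-1]:
--         seg = "".join(g).strip()
--         if seg:
--             out.append(seg)
--     last = "".join(segs[-1]).strip()
--     if last or not out:
--         out.append(last)
--     return out
-- ===== Notes on version B (the rewrite author's own statement) =====
-- stated objective: alternative
-- what changed: B first tokenizes the string into escape-pair/single-char tokens, then groups the token list into raw segments at top-level AND tokens (threading the previous raw char instead of re-indexing the string), and finally formats the segment list (strip, drop empty middles, last-segment rule) in a separate pass; A does everything in one index-driven loop with an incremental char buffer.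
import Mathlib
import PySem

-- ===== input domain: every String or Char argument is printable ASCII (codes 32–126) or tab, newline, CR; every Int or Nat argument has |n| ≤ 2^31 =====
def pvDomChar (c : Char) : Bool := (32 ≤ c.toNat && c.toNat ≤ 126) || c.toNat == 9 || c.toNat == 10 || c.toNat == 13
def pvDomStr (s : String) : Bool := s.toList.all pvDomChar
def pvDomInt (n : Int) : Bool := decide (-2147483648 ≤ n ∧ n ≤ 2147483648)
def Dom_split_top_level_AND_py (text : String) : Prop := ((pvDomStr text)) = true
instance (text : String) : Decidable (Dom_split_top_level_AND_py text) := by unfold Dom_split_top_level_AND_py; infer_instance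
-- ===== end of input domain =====

-- B tokenizes the string into escape-pair/single-char tokens, groups the token list into raw
-- segments at top-level AND tokens, then formats the segments in a separate pass; A does all
-- the work in one index-driven loop with an incremental char buffer. Objective: alternative
-- decomposition, same cost.


-- ===== PORT A =====
-- A's nested 'boundary' helper: ch.isspace() or (not ch.isalnum() and ch != "_")
def pvBoundaryA (ch : Char) : Bool :=
  PySem.Chars.isspace ch || (!PySem.Chars.isalnum ch && ch != '_')

-- A's if/elif chain updating (pr, br) for one char
def pvDepthsA (pr br : Int) (ch : Char) : Int × Int :=
  if ch == '(' then (pr + 1, br)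
  else if ch == ')' && decide (0 < pr) then (pr - 1, br)
  else if ch == '[' then (pr, br + 1)
  else if ch == ']' && decide (0 < br) then (pr, br - 1)
  else (pr, br)

-- A's while loop over index i with state (out, buf, pr, br); text or "" = text for a str.
-- s[i] for 0 ≤ i < n is s.getD i ' ' (in range, so exact); s[i:i+3] == "AND" is
-- (s.drop i).take 3 == ['A','N','D'] (exact for 0 ≤ i); "".join(buf).strip() is PySem.Chars.strip buf.
-- 'fuel' is only a structural-termination guard (i gains ≥ 1 per step, so fuel = n never runs out).
def pvLoopA (s : List Char) (n : Nat) : Nat → Nat → List String → List Char → Int → Int → List String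
  | 0, _, out, buf, _, _ =>
      if !(PySem.Chars.strip buf).isEmpty || out.isEmpty then out ++ [String.ofList (PySem.Chars.strip buf)] else out
  | fuel + 1, i, out, buf, pr, br =>
    if i < n then
      if s.getD i ' ' == '\\' && decide (i + 1 < n) then
        pvLoopA s n fuel (i + 2) out (buf ++ [s.getD i ' ', s.getD (i + 1) ' ']) pr br
      else
        if (pvDepthsA pr br (s.getD i ' ')).1 == 0 && (pvDepthsA pr br (s.getD i ' ')).2 == 0
            && decide (i + 3 ≤ n) && ((s.drop i).take 3 == ['A', 'N', 'D'])
            && pvBoundaryA (if 0 < i then s.getD (i - 1) ' ' else ' ')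
            && pvBoundaryA (if i + 3 < n then s.getD (i + 3) ' ' else ' ') then
          pvLoopA s n fuel (i + 3)
            (if (PySem.Chars.strip buf).isEmpty then out else out ++ [String.ofList (PySem.Chars.strip buf)])
            [] (pvDepthsA pr br (s.getD i ' ')).1 (pvDepthsA pr br (s.getD i ' ')).2
        else
          pvLoopA s n fuel (i + 1) out (buf ++ [s.getD i ' '])
            (pvDepthsA pr br (s.getD i ' ')).1 (pvDepthsA pr br (s.getD i ' ')).2
    else
      if !(PySem.Chars.strip buf).isEmpty || out.isEmpty then out ++ [String.ofList (PySem.Chars.strip buf)] else out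

def split_top_level_AND_py (text : String) : List String :=
  pvLoopA text.toList text.toList.length text.toList.length 0 [] [] 0 0

-- ===== PORT B =====
-- Source B's module-level _boundary
def pvBoundaryB (ch : Char) : Bool :=
  PySem.Chars.isspace ch || (!PySem.Chars.isalnum ch && ch != '_')

-- Source B's _tokenize: cut the char list into escape pairs "\X" and single chars
def pvTokenize : List Char → List (List Char)
  | [] => []
  | [c] => [[c]]
  | c :: c2 :: rest =>
      if c == '\\' then [c, c2] :: pvTokenize rest
      else [c] :: pvTokenize (c2 :: rest)

-- Source B's grouping loop: the Python walks the token list by an index k; the port recurses on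
-- the token suffix toks[k:] = t :: rest, so toks[k:k+3] is (t :: rest).take 3 and
-- toks[k+3][0] if k+3 < len(toks) else " " is the match on rest.drop 2.
def pvWalkB : List (List Char) → List Char → Char → Int → Int → List (List Char) → List (List Char)
  | [], cur, _, _, _, segs => segs ++ [cur]
  | t :: rest, cur, prev, pr, br, segs =>
    if t.length == 2 then
      pvWalkB rest (cur ++ t) (t.getLastD ' ') pr br segs
    else
      let ch := t.headD ' '
      let d : Int × Int :=
        if ch == '(' then (pr + 1, br)
        else if ch == ')' && decide (0 < pr) then (pr - 1, br)
        else if ch == '[' then (pr, br + 1)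
        else if ch == ']' && decide (0 < br) then (pr, br - 1)
        else (pr, br)
      if d.1 == 0 && d.2 == 0 && ((t :: rest).take 3 == [['A'], ['N'], ['D']])
          && pvBoundaryB prev
          && pvBoundaryB (match rest.drop 2 with | u :: _ => u.headD ' ' | [] => ' ') then
        pvWalkB (rest.drop 2) [] 'D' d.1 d.2 (segs ++ [cur])
      else
        pvWalkB rest (cur ++ t) ch d.1 d.2 segs
  termination_by ts _ _ _ _ _ => ts.length
  decreasing_by all_goals (simp; try omega)

-- Source B's formatting pass: strip every segment, drop empty middles, last-segment rule
def pvFormat (segs : List (List Char)) : List String :=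
  let out := (segs.dropLast).foldl
    (fun out g => if (PySem.Chars.strip g).isEmpty then out else out ++ [String.ofList (PySem.Chars.strip g)]) []
  let last := PySem.Chars.strip (segs.getLastD [])
  if !last.isEmpty || out.isEmpty then out ++ [String.ofList last] else out

def split_top_level_AND_py_alt (text : String) : List String :=
  pvFormat (pvWalkB (pvTokenize text.toList) [] ' ' 0 0 [])

-- ===== PRECONDITION & SPEC =====
def Spec_split_top_level_AND_py (text : String) (out : List String) : Prop := out = split_top_level_AND_py_alt text
instance (text : String) (out : List String) : Decidable (Spec_split_top_level_AND_py text out) := by unfold Spec_split_top_level_AND_py; infer_instance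

-- ===== CLAIM (what is proved, stated in full; the proofs are below) =====
def Claim_equal_split_top_level_AND_py : Prop := ∀ (text : String), Dom_split_top_level_AND_py text → Spec_split_top_level_AND_py text (split_top_level_AND_py text)

-- ===== LEMMAS AND PROOFS =====

-- proof-only recursive form of pvFormat, threading A's output accumulator
def fmtRec : List (List Char) → List String → List String
  | [], out => out
  | [g], out =>
      if !(PySem.Chars.strip g).isEmpty || out.isEmpty then out ++ [String.ofList (PySem.Chars.strip g)] else out
  | g :: g2 :: rest, out =>
      fmtRec (g2 :: rest)
        (if (PySem.Chars.strip g).isEmpty then out else out ++ [String.ofList (PySem.Chars.strip g)])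

lemma fmtRec_cons (g : List Char) (ws : List (List Char)) (hws : ws ≠ []) (out : List String) :
    fmtRec (g :: ws) out
      = fmtRec ws (if (PySem.Chars.strip g).isEmpty then out else out ++ [String.ofList (PySem.Chars.strip g)]) := by
  cases ws with
  | nil => exact absurd rfl hws
  | cons h t => rfl

lemma fmtRec_concat :
    ∀ (init : List (List Char)) (g : List Char) (out : List String),
      fmtRec (init ++ [g]) out
        = (let o2 := init.foldl
            (fun out g => if (PySem.Chars.strip g).isEmpty then out else out ++ [String.ofList (PySem.Chars.strip g)]) out
           if !(PySem.Chars.strip g).isEmpty || o2.isEmpty then o2 ++ [String.ofList (PySem.Chars.strip g)] else o2) := by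
  intro init
  induction init with
  | nil => intro g out; rfl
  | cons g0 init ih =>
      intro g out
      rw [List.cons_append, fmtRec_cons g0 (init ++ [g]) (by simp) out, ih]
      rfl

lemma pvFormat_eq_fmtRec (init : List (List Char)) (g : List Char) :
    pvFormat (init ++ [g]) = fmtRec (init ++ [g]) [] := by
  rw [fmtRec_concat]
  unfold pvFormat
  simp

-- pvWalkB's result is always (something) ++ [final segment]
lemma pvWalkB_shape :
    ∀ (N : Nat) (ts : List (List Char)), ts.length ≤ N →
      ∀ (cur : List Char) (prev : Char) (pr br : Int) (segs : List (List Char)),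
        ∃ init g, pvWalkB ts cur prev pr br segs = init ++ [g] := by
  intro N
  induction N with
  | zero =>
      intro ts hts cur prev pr br segs
      have h : ts = [] := List.length_eq_zero_iff.mp (Nat.le_zero.mp hts)
      subst h
      exact ⟨segs, cur, by rw [pvWalkB]⟩
  | succ N ih =>
      intro ts hts cur prev pr br segs
      cases ts with
      | nil => exact ⟨segs, cur, by rw [pvWalkB]⟩
      | cons t rest =>
          rw [pvWalkB]
          dsimp only
          split_ifs <;>
            first
              | exact ih rest (by simp at hts ⊢; omega) _ _ _ _ _
              | exact ih (rest.drop 2) (by simp at hts ⊢; omega) _ _ _ _ _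

lemma pvWalkB_ne_nil (ts : List (List Char)) (cur : List Char) (prev : Char) (pr br : Int)
    (segs : List (List Char)) : pvWalkB ts cur prev pr br segs ≠ [] := by
  obtain ⟨init, g, h⟩ := pvWalkB_shape ts.length ts (le_refl _) cur prev pr br segs
  simp [h]

-- accumulator lemma for the walk
lemma pvWalkB_acc :
    ∀ (N : Nat) (ts : List (List Char)), ts.length ≤ N →
      ∀ (cur : List Char) (prev : Char) (pr br : Int) (segs : List (List Char)),
        pvWalkB ts cur prev pr br segs = segs ++ pvWalkB ts cur prev pr br [] := by
  intro N
  induction N with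
  | zero =>
      intro ts hts cur prev pr br segs
      have h : ts = [] := List.length_eq_zero_iff.mp (Nat.le_zero.mp hts)
      subst h
      simp [pvWalkB]
  | succ N ih =>
      intro ts hts cur prev pr br segs
      cases ts with
      | nil => simp [pvWalkB]
      | cons t rest =>
          rw [pvWalkB, pvWalkB]
          dsimp only
          split_ifs <;>
            first
              | exact ih rest (by simp at hts ⊢; omega) _ _ _ _ _
              | (rw [ih (rest.drop 2) (by simp at hts ⊢; omega) _ _ _ _ (segs ++ [cur]),
                  ih (rest.drop 2) (by simp at hts ⊢; omega) _ _ _ _ ([] ++ [cur])]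
                 simp)

-- s.drop i starts with s.getD i ' ' when i is in range
lemma pvDrop_cons (s : List Char) (i : Nat) (h : i < s.length) :
    s.drop i = s.getD i ' ' :: s.drop (i + 1) := by
  rw [List.drop_eq_getElem_cons h, List.getD_eq_getElem s ' ' h]

-- tokenizing a list headed by a non-backslash char peels one single-char token
lemma pvTok_single (c : Char) (hc : ¬c = '\\') (l : List Char) :
    pvTokenize (c :: l) = [c] :: pvTokenize l := by
  cases l with
  | nil => rfl
  | cons c2 rest => simp [pvTokenize, hc]

-- a single-char token comes from a matching head char
lemma pvTok_cons_single (l : List Char) (c : Char) (ts : List (List Char))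
    (h : pvTokenize l = [c] :: ts) : ∃ r, l = c :: r ∧ ts = pvTokenize r := by
  cases l with
  | nil => simp [pvTokenize] at h
  | cons a rest =>
      cases rest with
      | nil =>
          simp [pvTokenize] at h
          exact ⟨[], by simp [h.1], by simp [h.2, pvTokenize]⟩
      | cons b rest2 =>
          by_cases ha : a = '\\'
          · simp [pvTokenize, ha] at h
          · rw [pvTok_single a ha] at h
            simp at h
            exact ⟨b :: rest2, by simp [h.1], h.2.symm⟩

-- the token-level AND test equals the raw slice test
lemma pvTok_take3 (l : List Char) :
    ((pvTokenize l).take 3 == [['A'], ['N'], ['D']]) = (l.take 3 == ['A', 'N', 'D']) := by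
  by_cases h : l.take 3 = ['A', 'N', 'D']
  · have hl : l = 'A' :: 'N' :: 'D' :: l.drop 3 := by
      conv_lhs => rw [← List.take_append_drop 3 l]
      rw [h]; rfl
    rw [hl, pvTok_single 'A' (by decide), pvTok_single 'N' (by decide), pvTok_single 'D' (by decide)]
    simp
  · have hr : (l.take 3 == ['A', 'N', 'D']) = false := by simpa using h
    rw [hr]
    by_cases ht : (pvTokenize l).take 3 = [['A'], ['N'], ['D']]
    · exfalso
      have h3 : pvTokenize l = ['A'] :: ['N'] :: ['D'] :: (pvTokenize l).drop 3 := by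
        conv_lhs => rw [← List.take_append_drop 3 (pvTokenize l)]
        rw [ht]; rfl
      obtain ⟨r1, hl1, hts1⟩ := pvTok_cons_single l 'A' _ h3
      obtain ⟨r2, hl2, hts2⟩ := pvTok_cons_single r1 'N' _ hts1.symm
      obtain ⟨r3, hl3, _⟩ := pvTok_cons_single r2 'D' _ hts2.symm
      rw [hl1, hl2, hl3] at h
      simp at h
    · simpa using ht

-- head char of the first token of pvTokenize l is the head char of l
lemma pvTok_headD (l : List Char) :
    (match pvTokenize l with | u :: _ => u.headD ' ' | [] => ' ') = l.headD ' ' := by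
  cases l with
  | nil => rfl
  | cons a rest =>
      cases rest with
      | nil => rfl
      | cons b rest2 =>
          by_cases ha : a = '\\' <;> simp [pvTokenize, ha]

lemma pvHeadD_drop (s : List Char) (j : Nat) :
    (s.drop j).headD ' ' = (if j < s.length then s.getD j ' ' else ' ') := by
  by_cases h : j < s.length
  · rw [pvDrop_cons s j h]; simp [h]
  · rw [List.drop_eq_nil_of_le (by omega)]; simp [h]

-- the escape-pair case of the tokenizer
lemma pvTok_esc (s : List Char) (i : Nat) (h1 : i < s.length) (h2 : s.getD i ' ' = '\\')
    (h3 : i + 1 < s.length) :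
    pvTokenize (s.drop i) = ['\\', s.getD (i + 1) ' '] :: pvTokenize (s.drop (i + 2)) := by
  rw [pvDrop_cons s i h1, pvDrop_cons s (i + 1) h3, h2]
  simp [pvTokenize]

-- the single-char case of the tokenizer
lemma pvTok_plain (s : List Char) (i : Nat) (h1 : i < s.length)
    (h2 : ¬(s.getD i ' ' = '\\' ∧ i + 1 < s.length)) :
    pvTokenize (s.drop i) = [s.getD i ' '] :: pvTokenize (s.drop (i + 1)) := by
  by_cases hc : s.getD i ' ' = '\\'
  · have hn : ¬i + 1 < s.length := fun h => h2 ⟨hc, h⟩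
    have hnil : s.drop (i + 1) = [] := List.drop_eq_nil_of_le (by omega)
    rw [pvDrop_cons s i h1, hnil]
    rfl
  · exact (pvDrop_cons s i h1) ▸ pvTok_single _ hc _

-- the slice comparison already forces i + 3 ≤ s.length
lemma pvAnd_le (s : List Char) (i : Nat) (h : ((s.drop i).take 3 == ['A', 'N', 'D']) = true) :
    i + 3 ≤ s.length := by
  rw [beq_iff_eq] at h
  have hl : ((s.drop i).take 3).length = 3 := by rw [h]; rfl
  simp only [List.length_take, List.length_drop] at hl
  omega

-- main simulation: A's loop from position i equals B's walk over the tokens of s.drop i,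
-- post-processed by fmtRec with A's accumulated output
lemma pvSim (s : List Char) :
    ∀ (fuel i : Nat) (out : List String) (buf : List Char) (prev : Char) (pr br : Int),
      i ≤ s.length → s.length - i ≤ fuel →
      prev = (if 0 < i then s.getD (i - 1) ' ' else ' ') →
      pvLoopA s s.length fuel i out buf pr br
        = fmtRec (pvWalkB (pvTokenize (s.drop i)) buf prev pr br []) out := by
  intro fuel
  induction fuel with
  | zero =>
      intro i out buf prev pr br hin hk hprev
      have hi : i = s.length := by omega
      subst hi
      rw [List.drop_length]
      simp only [pvLoopA, pvTokenize, pvWalkB, List.nil_append]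
      rfl
  | succ fuel ih =>
      intro i out buf prev pr br hin hk hprev
      by_cases hlt : i < s.length
      · rw [pvLoopA, if_pos hlt]
        by_cases hesc : (s.getD i ' ' == '\\' && decide (i + 1 < s.length)) = true
        · rw [if_pos hesc]
          simp only [Bool.and_eq_true, beq_iff_eq, decide_eq_true_eq] at hesc
          rw [pvTok_esc s i hlt hesc.1 hesc.2, pvWalkB]
          rw [if_pos (show ((['\\', s.getD (i + 1) ' '] : List Char).length == 2) = true from rfl)]
          rw [hesc.1]
          show _ = fmtRec (pvWalkB _ (buf ++ ['\\', s.getD (i + 1) ' ']) (s.getD (i + 1) ' ') pr br []) out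
          exact ih (i + 2) out (buf ++ ['\\', s.getD (i + 1) ' ']) _ pr br (by omega) (by omega)
            (by simp)
        · rw [if_neg hesc]
          have hne : ¬(s.getD i ' ' = '\\' ∧ i + 1 < s.length) := by
            intro ⟨h1, h2⟩
            exact hesc (by rw [h1]; simp [h2])
          rw [pvTok_plain s i hlt hne, pvWalkB]
          rw [if_neg (show ¬((([s.getD i ' '] : List Char)).length == 2) = true from by simp)]
          dsimp only [List.headD_cons]
          -- identify B's inline depth chain with pvDepthsA
          have hdd : (if s.getD i ' ' == '(' then ((pr : Int) + 1, br)
              else if s.getD i ' ' == ')' && decide (0 < pr) then (pr - 1, br)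
              else if s.getD i ' ' == '[' then (pr, br + 1)
              else if s.getD i ' ' == ']' && decide (0 < br) then (pr, br - 1)
              else (pr, br)) = pvDepthsA pr br (s.getD i ' ') := rfl
          rw [hdd]
          -- show the two conditions are equal
          have hcond :
              ((pvDepthsA pr br (s.getD i ' ')).1 == 0 && (pvDepthsA pr br (s.getD i ' ')).2 == 0
                && decide (i + 3 ≤ s.length) && ((s.drop i).take 3 == ['A', 'N', 'D'])
                && pvBoundaryA (if 0 < i then s.getD (i - 1) ' ' else ' ')
                && pvBoundaryA (if i + 3 < s.length then s.getD (i + 3) ' ' else ' '))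
              = ((pvDepthsA pr br (s.getD i ' ')).1 == 0 && (pvDepthsA pr br (s.getD i ' ')).2 == 0
                && (([s.getD i ' '] :: pvTokenize (s.drop (i + 1))).take 3 == [['A'], ['N'], ['D']])
                && pvBoundaryB prev
                && pvBoundaryB (match (pvTokenize (s.drop (i + 1))).drop 2 with
                    | u :: _ => u.headD ' ' | [] => ' ')) := by
            have htok : (([s.getD i ' '] :: pvTokenize (s.drop (i + 1))).take 3
                == [['A'], ['N'], ['D']]) = ((s.drop i).take 3 == ['A', 'N', 'D']) := by
              rw [← pvTok_plain s i hlt hne, pvTok_take3]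
            rw [htok, hprev]
            show _ = (_ && _ && ((s.drop i).take 3 == ['A', 'N', 'D']) && pvBoundaryA _ && _)
            by_cases hsl : ((s.drop i).take 3 == ['A', 'N', 'D']) = true
            · have h3 : i + 3 ≤ s.length := pvAnd_le s i hsl
              have hdec : s.drop i = 'A' :: 'N' :: 'D' :: s.drop (i + 3) := by
                have := List.take_append_drop 3 (s.drop i)
                rw [beq_iff_eq] at hsl
                rw [← this, hsl, List.drop_drop]
                rfl
              have hA : s.getD i ' ' = 'A' := by
                have := pvDrop_cons s i hlt
                rw [hdec] at this
                exact (List.cons.injEq _ _ _ _ ▸ this.symm).1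
              have hrest : pvTokenize (s.drop (i + 1)) = ['N'] :: ['D'] :: pvTokenize (s.drop (i + 3)) := by
                have hd1 : s.drop (i + 1) = 'N' :: 'D' :: s.drop (i + 3) := by
                  have := pvDrop_cons s i hlt
                  rw [hdec, hA] at this
                  exact (List.cons.injEq _ _ _ _ ▸ this).2.symm
                rw [hd1, pvTok_single 'N' (by decide), pvTok_single 'D' (by decide)]
              have hnxt : (match (pvTokenize (s.drop (i + 1))).drop 2 with
                  | u :: _ => u.headD ' ' | [] => ' ')
                  = (if i + 3 < s.length then s.getD (i + 3) ' ' else ' ') := by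
                rw [hrest]
                show (match pvTokenize (s.drop (i + 3)) with | u :: _ => u.headD ' ' | [] => ' ') = _
                rw [pvTok_headD, pvHeadD_drop]
              rw [hnxt, hsl, show decide (i + 3 ≤ s.length) = true from by simp [h3]]
              show (_ && _ && (true && true) && _ && _) = (_ && _ && true && pvBoundaryB _ && pvBoundaryB _)
              simp only [pvBoundaryA, pvBoundaryB, Bool.and_true]
            · have hf : ((s.drop i).take 3 == ['A', 'N', 'D']) = false := by simpa using hsl
              rw [hf]
              simp
          by_cases hand : ((pvDepthsA pr br (s.getD i ' ')).1 == 0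
              && (pvDepthsA pr br (s.getD i ' ')).2 == 0
              && decide (i + 3 ≤ s.length) && ((s.drop i).take 3 == ['A', 'N', 'D'])
              && pvBoundaryA (if 0 < i then s.getD (i - 1) ' ' else ' ')
              && pvBoundaryA (if i + 3 < s.length then s.getD (i + 3) ' ' else ' ')) = true
          · rw [if_pos hand]
            have hB := hcond ▸ hand
            rw [if_pos (show ((pvDepthsA pr br (s.getD i ' ')).1 == 0
                && (pvDepthsA pr br (s.getD i ' ')).2 == 0
                && (([s.getD i ' '] :: pvTokenize (s.drop (i + 1))).take 3 == [['A'], ['N'], ['D']])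
                && pvBoundaryB prev
                && pvBoundaryB (match (pvTokenize (s.drop (i + 1))).drop 2 with
                    | u :: _ => u.headD ' ' | [] => ' ')) = true from hB)]
            -- decompose the slice to compute the new token list and prev char
            have hsl : ((s.drop i).take 3 == ['A', 'N', 'D']) = true := by
              simp only [Bool.and_eq_true] at hand
              exact hand.1.1.2
            have h3 : i + 3 ≤ s.length := pvAnd_le s i hsl
            have hdec : s.drop i = 'A' :: 'N' :: 'D' :: s.drop (i + 3) := by
              have := List.take_append_drop 3 (s.drop i)
              rw [beq_iff_eq] at hsl
              rw [← this, hsl, List.drop_drop]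
              rfl
            have hA : s.getD i ' ' = 'A' := by
              have := pvDrop_cons s i hlt
              rw [hdec] at this
              exact (List.cons.injEq _ _ _ _ ▸ this.symm).1
            have hd1 : s.drop (i + 1) = 'N' :: 'D' :: s.drop (i + 3) := by
              have := pvDrop_cons s i hlt
              rw [hdec, hA] at this
              exact (List.cons.injEq _ _ _ _ ▸ this).2.symm
            have hrest : pvTokenize (s.drop (i + 1)) = ['N'] :: ['D'] :: pvTokenize (s.drop (i + 3)) := by
              rw [hd1, pvTok_single 'N' (by decide), pvTok_single 'D' (by decide)]
            have hdrop2 : (pvTokenize (s.drop (i + 1))).drop 2 = pvTokenize (s.drop (i + 3)) := by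
              rw [hrest]
              rfl
            rw [hdrop2]
            have hD : s.getD (i + 2) ' ' = 'D' := by
              have hq : s[i + 2]? = some 'D' := by
                have h : (List.drop i s)[2]? = s[i + 2]? := by simp
                rw [hdec] at h
                simpa using h.symm
              rw [List.getD_eq_getElem?_getD, hq]
              rfl
            rw [pvWalkB_acc (pvTokenize (s.drop (i + 3))).length _ (le_refl _) [] 'D'
              (pvDepthsA pr br (s.getD i ' ')).1 (pvDepthsA pr br (s.getD i ' ')).2 ([] ++ [buf])]
            simp only [List.nil_append, List.cons_append, List.nil_append]
            rw [fmtRec_cons buf _ (pvWalkB_ne_nil _ _ _ _ _ _)]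
            rw [ih (i + 3) _ [] 'D' _ _ (by omega) (by omega) (by rw [if_pos (by omega : 0 < i + 3), show i + 3 - 1 = i + 2 from by omega, hD])]
          · rw [if_neg hand]
            have hB : ¬((pvDepthsA pr br (s.getD i ' ')).1 == 0
                && (pvDepthsA pr br (s.getD i ' ')).2 == 0
                && (([s.getD i ' '] :: pvTokenize (s.drop (i + 1))).take 3 == [['A'], ['N'], ['D']])
                && pvBoundaryB prev
                && pvBoundaryB (match (pvTokenize (s.drop (i + 1))).drop 2 with
                    | u :: _ => u.headD ' ' | [] => ' ')) = true := hcond ▸ hand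
            rw [if_neg hB]
            rw [ih (i + 1) out (buf ++ [s.getD i ' ']) _ _ _ (by omega) (by omega) (by rw [if_pos (by omega : 0 < i + 1), show i + 1 - 1 = i from by omega])]
      · have hi : i = s.length := by omega
        subst hi
        rw [pvLoopA, if_neg hlt, List.drop_length]
        simp only [pvTokenize, pvWalkB, List.nil_append]
        rfl

-- ===== VERDICT (by name: the statement is the Claim_ definition above) =====
theorem split_top_level_AND_py_spec : Claim_equal_split_top_level_AND_py := by
  intro text _
  unfold Spec_split_top_level_AND_py split_top_level_AND_py split_top_level_AND_py_alt
  obtain ⟨init, g, hw⟩ := pvWalkB_shape (pvTokenize text.toList).length _ (le_refl _)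
    ([] : List Char) ' ' 0 0 []
  rw [pvSim text.toList text.toList.length 0 [] [] ' ' 0 0 (Nat.zero_le _) (by omega) (by simp),
    List.drop_zero, hw, ← pvFormat_eq_fmtRec]
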